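-- pv_equiv track=rewrite | github.com/xyyyt/random-exercices-python | exercises/replace_words_of_length_five_and_more.py | replace_words_of_length_five_and_more
-- ===== SOURCE A (Python) =====
-- def replace_words_of_length_five_and_more(s : str) -> str:
--     if not s:
--         return ""
--
--     modified_str : str = ""
--     n : int = 0
--
--     while n < len(s):
--         if s[n].isalpha():
--             word_begin_pos : int = n
--
--             while n < len(s) and s[n].isalpha():
--                 n += 1
--
--             LENGTH_TO_REPLACE : int = 5
--             word_length : int = n - word_begin_pos
--
--             if word_length >= LENGTH_TO_REPLACE:
--                 CHARACTER_TO_USE_FOR_REPLACE = '#'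
--
--                 modified_str += '#' * word_length
--             else:
--                 modified_str += s[word_begin_pos:n]
--         else:
--             word_begin_pos = n
--
--             while n < len(s) and not s[n].isalpha():
--                 n += 1
--
--             modified_str += s[word_begin_pos:n]
--
--     return modified_str
-- ===== SOURCE B (Python) =====
-- def replace_words_of_length_five_and_more(s: str) -> str:
--     # Phase 1: split s into maximal runs of same "alpha-ness" in one pass.
--     runs = []
--     for ch in s:
--         if runs and runs[-1][0].isalpha() == ch.isalpha():
--             runs[-1].append(ch)
--         else:
--             runs.append([ch])
--     # Phase 2: render each run.
--     return ''.join('#' * len(r) if r[0].isalpha() and len(r) >= 5 else ''.join(r)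
--                    for r in runs)
-- ===== Notes on version B (the rewrite author's own statement) =====
-- stated objective: idiomatic
-- what changed: A interleaves scanning and emitting with an index-tracked outer while and two nested inner while loops plus slicing; B first splits the string into alpha/non-alpha runs with one flat for loop (no indices), then renders the runs with a join over a comprehension.
import Mathlib
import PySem

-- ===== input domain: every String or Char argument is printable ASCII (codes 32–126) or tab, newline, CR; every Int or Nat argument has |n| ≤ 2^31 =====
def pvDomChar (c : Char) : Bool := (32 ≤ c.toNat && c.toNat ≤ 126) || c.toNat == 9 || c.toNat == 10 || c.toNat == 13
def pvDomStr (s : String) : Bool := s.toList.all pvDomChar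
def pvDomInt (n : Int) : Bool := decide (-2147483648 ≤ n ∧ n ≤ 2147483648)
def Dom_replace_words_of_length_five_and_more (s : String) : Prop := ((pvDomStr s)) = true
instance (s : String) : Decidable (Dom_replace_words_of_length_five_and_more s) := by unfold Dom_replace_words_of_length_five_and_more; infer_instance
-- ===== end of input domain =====

-- B replaces A's index-tracked outer/inner while loops by a run-splitting pass
-- followed by a render-and-join pass (idiomatic decomposition, same cost).

-- ===== PORT A =====
-- outer while loop: each step consumes one maximal alpha / non-alpha span
-- (the inner while advances n over the span; s[word_begin_pos:n] is that span)
def pvLoopA (l : List Char) : List Char :=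
  match l with
  | [] => []
  | c :: rest =>
    if PySem.Chars.isalpha c then
      let w := (c :: rest).takeWhile PySem.Chars.isalpha
      (if 5 ≤ w.length then List.replicate w.length '#' else w)
        ++ pvLoopA ((c :: rest).dropWhile PySem.Chars.isalpha)
    else
      (c :: rest).takeWhile (fun x => !PySem.Chars.isalpha x)
        ++ pvLoopA ((c :: rest).dropWhile (fun x => !PySem.Chars.isalpha x))
termination_by l.length
decreasing_by
  · simp [*]; exact List.length_dropWhile_le _ _
  · simp [*]; exact List.length_dropWhile_le _ _

def replace_words_of_length_five_and_more (s : String) : String :=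
  if s.toList.isEmpty then "" else String.ofList (pvLoopA s.toList)

-- ===== PORT B =====
-- phase 1 step: extend the last run or start a new one
def pvStepB (runs : List (List Char)) (ch : Char) : List (List Char) :=
  match runs.getLast? with
  | some r =>
    if (match r with
        | [] => false
        | c :: _ => PySem.Chars.isalpha c == PySem.Chars.isalpha ch) then
      runs.dropLast ++ [r ++ [ch]]
    else
      runs ++ [[ch]]
  | none => [[ch]]

-- phase 2: render one run ('' for the never-occurring empty run, totality guard)
def pvRenderB (r : List Char) : String :=
  match r with
  | [] => ""
  | c :: _ =>
    if PySem.Chars.isalpha c && 5 ≤ r.length then String.ofList (List.replicate r.length '#')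
    else String.ofList r

def replace_words_of_length_five_and_more_alt (s : String) : String :=
  String.join ((s.toList.foldl pvStepB []).map pvRenderB)

-- ===== PRECONDITION & SPEC =====
def Spec_replace_words_of_length_five_and_more (s : String) (out : String) : Prop := out = replace_words_of_length_five_and_more_alt s
instance (s : String) (out : String) : Decidable (Spec_replace_words_of_length_five_and_more s out) := by unfold Spec_replace_words_of_length_five_and_more; infer_instance

-- ===== CLAIM (what is proved, stated in full; the proofs are below) =====
def Claim_equal_replace_words_of_length_five_and_more : Prop := ∀ (s : String), Dom_replace_words_of_length_five_and_more s → Spec_replace_words_of_length_five_and_more s (replace_words_of_length_five_and_more s)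

-- ===== LEMMAS AND PROOFS =====

-- the runs B's phase 1 computes, characterised by span recursion
def pvRuns (l : List Char) : List (List Char) :=
  match l with
  | [] => []
  | c :: rest =>
    ((c :: rest).takeWhile (fun x => PySem.Chars.isalpha x == PySem.Chars.isalpha c))
      :: pvRuns ((c :: rest).dropWhile (fun x => PySem.Chars.isalpha x == PySem.Chars.isalpha c))
termination_by l.length
decreasing_by
  simp; exact List.length_dropWhile_le _ _

lemma pvRuns_nil : pvRuns [] = [] := by
  rw [pvRuns.eq_def]

lemma pvRuns_cons (c : Char) (t : List Char) :
    pvRuns (c :: t) = (c :: t.takeWhile (fun x => PySem.Chars.isalpha x == PySem.Chars.isalpha c))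
      :: pvRuns (t.dropWhile (fun x => PySem.Chars.isalpha x == PySem.Chars.isalpha c)) := by
  rw [pvRuns.eq_def]
  simp [List.takeWhile_cons, List.dropWhile_cons]

lemma pvFoldl_from (l : List Char) : ∀ (rs : List (List Char)) (c0 : Char) (r : List Char),
    List.foldl pvStepB (rs ++ [c0 :: r]) l =
      rs ++ ((c0 :: r) ++ l.takeWhile (fun x => PySem.Chars.isalpha x == PySem.Chars.isalpha c0))
        :: pvRuns (l.dropWhile (fun x => PySem.Chars.isalpha x == PySem.Chars.isalpha c0)) := by
  induction l with
  | nil => intro rs c0 r; simp [pvRuns_nil]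
  | cons ch t ih =>
    intro rs c0 r
    by_cases hk : PySem.Chars.isalpha ch = PySem.Chars.isalpha c0
    · have hstep : pvStepB (rs ++ [c0 :: r]) ch = rs ++ [c0 :: (r ++ [ch])] := by
        simp [pvStepB, List.getLast?_append, hk]
      rw [List.foldl_cons, hstep, ih rs c0 (r ++ [ch])]
      simp [List.takeWhile_cons, List.dropWhile_cons, hk]
    · have hstep : pvStepB (rs ++ [c0 :: r]) ch = (rs ++ [c0 :: r]) ++ [[ch]] := by
        simp [pvStepB, List.getLast?_append, Ne.symm hk]
      rw [List.foldl_cons, hstep]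
      have := ih (rs ++ [c0 :: r]) ch []
      simp only [List.append_assoc] at this ⊢
      rw [this]
      have hne : (PySem.Chars.isalpha ch == PySem.Chars.isalpha c0) = false := by
        simp [hk]
      rw [List.takeWhile_cons, List.dropWhile_cons]
      simp only [hne, Bool.false_eq_true, if_false]
      rw [pvRuns_cons]
      simp

lemma pvFoldl_eq_runs (l : List Char) : List.foldl pvStepB [] l = pvRuns l := by
  cases l with
  | nil => simp [pvRuns_nil]
  | cons c t =>
    have hstep : pvStepB [] c = [] ++ [c :: []] := by simp [pvStepB]
    rw [List.foldl_cons, hstep, pvFoldl_from t [] c []]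
    rw [pvRuns_cons]
    simp

-- list-level renderer = pvRenderB's character content
def pvRenderL (r : List Char) : List Char :=
  match r with
  | [] => []
  | c :: _ =>
    if PySem.Chars.isalpha c && 5 ≤ r.length then List.replicate r.length '#' else r

lemma pvToList_renderB (r : List Char) : (pvRenderB r).toList = pvRenderL r := by
  cases r with
  | nil => rfl
  | cons c t =>
    simp only [pvRenderB, pvRenderL]
    split <;> simp [String.toList_ofList]

lemma pvToList_join (l : List String) : (String.join l).toList = (l.map String.toList).flatten := by
  have h : ∀ (l : List String) (a : String),
      (List.foldl (· ++ ·) a l).toList = a.toList ++ (l.map String.toList).flatten := by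
    intro l
    induction l with
    | nil => intro a; simp
    | cons x xs ih => intro a; simp [List.foldl_cons, ih, String.toList_append]
  simpa using h l ""

lemma pvLoopA_eq (l : List Char) : pvLoopA l = ((pvRuns l).map pvRenderL).flatten := by
  induction l using pvLoopA.induct with
  | case1 => simp [pvLoopA, pvRuns_nil]
  | case2 c rest ha ih =>
    have hpred : (fun x => PySem.Chars.isalpha x == PySem.Chars.isalpha c)
        = PySem.Chars.isalpha := by
      funext x; simp [ha]
    rw [pvLoopA.eq_def]
    simp only [ha, if_true]
    rw [pvRuns_cons]
    simp only [hpred]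
    have hw : (c :: rest).takeWhile PySem.Chars.isalpha
        = c :: rest.takeWhile PySem.Chars.isalpha := by
      simp [List.takeWhile_cons, ha]
    have hd : (c :: rest).dropWhile PySem.Chars.isalpha
        = rest.dropWhile PySem.Chars.isalpha := by
      simp [List.dropWhile_cons, ha]
    rw [hd] at ih
    rw [hw, hd, List.map_cons, List.flatten_cons, ← ih]
    congr 1
    simp only [hw, pvRenderL]
    simp [ha]
  | case3 c rest ha ih =>
    have ha' : PySem.Chars.isalpha c = false := by
      simpa [Bool.not_eq_true] using ha
    have hpred : (fun x => PySem.Chars.isalpha x == PySem.Chars.isalpha c)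
        = (fun x => !PySem.Chars.isalpha x) := by
      funext x; simp [ha']
    rw [pvLoopA.eq_def]
    simp only [ha', Bool.false_eq_true, if_false]
    rw [pvRuns_cons]
    simp only [hpred]
    have hw : (c :: rest).takeWhile (fun x => !PySem.Chars.isalpha x)
        = c :: rest.takeWhile (fun x => !PySem.Chars.isalpha x) := by
      simp [List.takeWhile_cons, ha']
    have hd : (c :: rest).dropWhile (fun x => !PySem.Chars.isalpha x)
        = rest.dropWhile (fun x => !PySem.Chars.isalpha x) := by
      simp [List.dropWhile_cons, ha']
    rw [hd] at ih
    rw [hw, hd, List.map_cons, List.flatten_cons, ← ih]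
    congr 1
    simp only [hw, pvRenderL]
    simp [ha']

lemma pvMain (l : List Char) :
    String.ofList (pvLoopA l) = String.join (((List.foldl pvStepB [] l)).map pvRenderB) := by
  have h : (String.join (((List.foldl pvStepB [] l)).map pvRenderB)).toList = pvLoopA l := by
    rw [pvToList_join, pvFoldl_eq_runs, List.map_map, pvLoopA_eq]
    congr 1
    exact List.map_congr_left (fun r _ => pvToList_renderB r)
  calc String.ofList (pvLoopA l)
      = String.ofList ((String.join (((List.foldl pvStepB [] l)).map pvRenderB)).toList) := by
        rw [h]
    _ = _ := String.ofList_toList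

-- ===== VERDICT (by name: the statement is the Claim_ definition above) =====
theorem replace_words_of_length_five_and_more_spec : Claim_equal_replace_words_of_length_five_and_more := by
  intro s _
  unfold Spec_replace_words_of_length_five_and_more replace_words_of_length_five_and_more replace_words_of_length_five_and_more_alt
  by_cases he : s.toList.isEmpty
  · simp only [he, if_true]
    rw [List.isEmpty_iff.mp he]
    simp [String.join]
  · simp only [he, Bool.false_eq_true, if_false]
    exact pvMain s.toList
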